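-- pv_equiv track=rewrite | github.com/jeon0428k/files | build_copy/main.py | build_prefix_by_label
-- ===== SOURCE A (Python) =====
-- def _clean_rel_path(s: str) -> str:
--     return str(s).strip().strip("/").strip("\\")
--
-- def build_prefix_by_label(svr_path_pairs: list[tuple[str, str]]) -> dict[str, str]:
--     """
--     (prefix, "dev/a") -> label=dev 에 대해 prefix 저장
--     - label 중복 시 첫 항목 우선(설정 순서)
--     """
--     out: dict[str, str] = {}
--     for prefix, p in svr_path_pairs:
--         p2 = _clean_rel_path(p)
--         if not p2:
--             continue
--         label = p2.split("/")[0].split("\\")[0]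
--         if label and label not in out:
--             out[label] = "" if prefix is None else str(prefix).strip()
--     return out
-- ===== SOURCE B (Python) =====
-- def _label(p):
--     p2 = str(p).strip().strip("/").strip("\\")
--     return p2.split("/")[0].split("\\")[0]
--
-- def build_prefix_by_label(svr_path_pairs):
--     # three-phase pipeline: label every pair, resolve first-wins values by a
--     # reversed overwrite pass, recover key order by ordered dedup, then assemble
--     labeled = [(_label(p), "" if prefix is None else str(prefix).strip())
--                for prefix, p in svr_path_pairs]
--     first_val = {}
--     for lab, val in reversed(labeled):
--         if lab:
--             first_val[lab] = val  # last write = earliest qualifying pair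
--     order = list(dict.fromkeys(lab for lab, _ in labeled if lab))
--     return {lab: first_val[lab] for lab in order}
-- ===== Notes on version B (the rewrite author's own statement) =====
-- stated objective: alternative
-- what changed: A's single stateful loop (dict membership test + conditional insert) is replaced by a three-phase pipeline: label every pair, resolve first-wins values by one reversed overwrite pass with no membership test, recover key order by ordered dedup (dict.fromkeys), then assemble the result dict.
import Mathlib
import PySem

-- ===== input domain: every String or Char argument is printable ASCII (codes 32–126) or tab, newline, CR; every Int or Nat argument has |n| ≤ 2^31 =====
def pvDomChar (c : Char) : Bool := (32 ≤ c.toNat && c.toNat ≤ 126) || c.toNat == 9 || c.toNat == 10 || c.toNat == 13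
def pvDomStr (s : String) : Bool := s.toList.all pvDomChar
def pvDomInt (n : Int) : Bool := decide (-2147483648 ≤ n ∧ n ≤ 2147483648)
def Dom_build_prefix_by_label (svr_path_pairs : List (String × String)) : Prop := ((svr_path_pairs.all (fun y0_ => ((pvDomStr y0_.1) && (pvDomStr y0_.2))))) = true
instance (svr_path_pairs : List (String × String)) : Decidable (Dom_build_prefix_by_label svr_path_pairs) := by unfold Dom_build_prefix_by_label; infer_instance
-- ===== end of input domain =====

-- B replaces A's single stateful dict-building loop by a three-phase pipeline
-- (label every pair; first-wins value map via a reversed overwrite pass;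
-- key order via ordered dedup; assemble) — objective: alternative decomposition.

-- ===== PORT A =====
-- _clean_rel_path: str(s).strip().strip("/").strip("\\")
def pvCleanRelPath (s : String) : String :=
  PySem.Str.stripChars (PySem.Str.stripChars (PySem.Str.strip s) "/") "\\"

-- p2.split("/")[0].split("\\")[0]  (split with a non-empty sep always returns a
-- non-empty list, so the [0] indexing cannot fail; headD "" is that element)
def pvLabelOf (p2 : String) : String :=
  ((PySem.Str.split? (((PySem.Str.split? p2 "/").getD []).headD "") "\\").getD []).headD ""

def build_prefix_by_label (svr_path_pairs : List (String × String)) : List (String × String) :=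
  (svr_path_pairs.foldl (fun out pr =>
      let p2 := pvCleanRelPath pr.2
      if p2 = "" then out
      else
        let label := pvLabelOf p2
        -- prefix is a String here, so Python's "prefix is None" branch never fires
        if label != "" && !(out.contains label) then
          out.insert label (PySem.Str.strip pr.1)
        else out)
    PySem.Dict.empty).items

-- ===== PORT B =====
-- Source B's _label: clean (strip, strip "/", strip "\\"), then the piece before
-- the first "/" and "\\" (split [0] twice; non-empty sep ⇒ headD "" is [0])
def pvAltLabel (p : String) : String :=
  ((PySem.Str.split? (((PySem.Str.split? (PySem.Str.stripChars (PySem.Str.stripChars (PySem.Str.strip p) "/") "\\") "/").getD []).headD "") "\\").getD []).headD ""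

def build_prefix_by_label_alt (svr_path_pairs : List (String × String)) : List (String × String) :=
  let labeled := svr_path_pairs.map (fun pr => (pvAltLabel pr.2, PySem.Str.strip pr.1))
  let firstVal := labeled.reverse.foldl
      (fun d q => if q.1 != "" then d.insert q.1 q.2 else d) PySem.Dict.empty
  let order := PySem.List.dedup ((labeled.map Prod.fst).filter (fun lab => lab != ""))
  -- {lab: first_val[lab] for lab in order}: every lab in order was written into
  -- first_val, so the lookup cannot fail; getD '' is that present value
  (order.foldl (fun d lab => d.insert lab (firstVal.getD lab "")) PySem.Dict.empty).items

-- ===== PRECONDITION & SPEC =====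
def Spec_build_prefix_by_label (svr_path_pairs : List (String × String)) (out : List (String × String)) : Prop := out = build_prefix_by_label_alt svr_path_pairs
instance (svr_path_pairs : List (String × String)) (out : List (String × String)) : Decidable (Spec_build_prefix_by_label svr_path_pairs out) := by unfold Spec_build_prefix_by_label; infer_instance

-- ===== CLAIM (what is proved, stated in full; the proofs are below) =====
def Claim_equal_build_prefix_by_label : Prop := ∀ (svr_path_pairs : List (String × String)), Dom_build_prefix_by_label svr_path_pairs → Spec_build_prefix_by_label svr_path_pairs (build_prefix_by_label svr_path_pairs)

-- ===== LEMMAS AND PROOFS =====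

-- A's loop step, over the already-labeled pair
def pvStepA (d : PySem.Dict String String) (q : String × String) : PySem.Dict String String :=
  if q.1 != "" && !(d.contains q.1) then d.insert q.1 q.2 else d

-- value of the first pair of L carrying label lab ('' if none)
def pvFirst (L : List (String × String)) (lab : String) : String :=
  ((L.find? (fun q => q.1 == lab)).map (·.2)).getD ""

theorem pvLabelOf_empty : pvLabelOf "" = "" := rfl

theorem pvAltLabel_eq (p : String) : pvAltLabel p = pvLabelOf (pvCleanRelPath p) := rfl

-- A's loop body equals pvStepA applied to the labeled pair
theorem pvStep_eq :
    (fun (out : PySem.Dict String String) (pr : String × String) =>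
      let p2 := pvCleanRelPath pr.2
      if p2 = "" then out
      else
        let label := pvLabelOf p2
        if label != "" && !(out.contains label) then
          out.insert label (PySem.Str.strip pr.1)
        else out)
    = fun out pr => pvStepA out (pvAltLabel pr.2, PySem.Str.strip pr.1) := by
  funext out pr
  dsimp only [pvStepA]
  rw [pvAltLabel_eq]
  generalize pvCleanRelPath pr.2 = c
  by_cases h : c = ""
  · rw [if_pos h, h, pvLabelOf_empty]
    simp only [bne_self_eq_false, Bool.false_and, Bool.false_eq_true, if_false]
  · rw [if_neg h]

-- value map built by the reversed overwrite pass: lookup = first occurrence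
theorem pvFirstVal_get? (L : List (String × String)) (lab : String) (hlab : lab ≠ "") :
    (L.reverse.foldl (fun d q => if q.1 != "" then d.insert q.1 q.2 else d)
        PySem.Dict.empty).get? lab
      = (L.find? (fun q => q.1 == lab)).map (·.2) := by
  induction L with
  | nil => simp [PySem.Dict.get?, PySem.Dict.empty]
  | cons q L ih =>
    rw [List.reverse_cons, List.foldl_append, List.foldl_cons, List.foldl_nil]
    by_cases hq : q.1 = lab
    · subst hq
      have hb : (q.1 != "") = true := by simpa using hlab
      rw [if_pos hb, PySem.Dict.get?_insert_self,
        List.find?_cons_of_pos (by simp)]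
      rfl
    · rw [List.find?_cons_of_neg (by simpa using hq)]
      by_cases hq0 : q.1 = ""
      · rw [if_neg (by simp [hq0])]
        exact ih
      · rw [if_pos (by simpa using hq0),
          PySem.Dict.get?_insert_of_ne _ _ (fun h => hq h.symm)]
        exact ih

-- main invariant for A's fold
theorem pvMain (L : List (String × String)) (d : PySem.Dict String String)
    (hd : d.keys.Nodup) :
    (L.foldl pvStepA d).items
      = d.items ++ ((PySem.Set.ofList ((L.map Prod.fst).filter (fun lab => lab != ""))).filter
            (fun lab => !(d.contains lab))).map (fun lab => (lab, pvFirst L lab)) := by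
  induction L generalizing d with
  | nil => simp [PySem.Set.ofList, PySem.Set.empty]
  | cons q L ih =>
    rw [List.foldl_cons, List.map_cons, List.filter_cons]
    by_cases hq0 : q.1 = ""
    · have hb : (q.1 != "") = false := by simpa using hq0
      have hstep : pvStepA d q = d := by simp [pvStepA, hb]
      rw [hstep, ih d hd, hb, if_neg (by simp)]
      congr 1
      apply List.map_congr_left
      intro lab hmem
      have hlab : lab ≠ "" := by
        have := List.of_mem_filter ((PySem.Set.mem_ofList _ _).mp (List.mem_filter.mp hmem).1)
        simpa using this
      have hfind : pvFirst (q :: L) lab = pvFirst L lab := by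
        have hpred : ¬ ((fun r : String × String => r.1 == lab) q = true) := by
          simp only [hq0, beq_iff_eq]
          exact fun h => hlab h.symm
        simp only [pvFirst]
        rw [List.find?_cons_of_neg (p := fun r : String × String => r.1 == lab) (a := q) (l := L) hpred]
      rw [hfind]
    · have hb : (q.1 != "") = true := by simpa using hq0
      rw [hb, if_pos rfl, PySem.Set.ofList_cons]
      by_cases hc : d.contains q.1
      · have hstep : pvStepA d q = d := by simp [pvStepA, hc]
        rw [hstep, ih d hd]
        rw [List.filter_cons, if_neg (by simp [hc])]
        have hdisc : ((PySem.Set.ofList ((L.map Prod.fst).filter (fun lab => lab != ""))).discard q.1).filter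
              (fun lab => !(d.contains lab))
            = (PySem.Set.ofList ((L.map Prod.fst).filter (fun lab => lab != ""))).filter
              (fun lab => !(d.contains lab)) := by
          rw [PySem.Set.discard, List.filter_filter]
          apply List.filter_congr
          intro lab _
          by_cases hql : lab = q.1
          · subst hql; simp [hc]
          · simp [beq_eq_false_iff_ne.mpr hql]
        rw [hdisc]
        congr 1
        apply List.map_congr_left
        intro lab hmem
        have hne : lab ≠ q.1 := by
          intro h
          have := List.of_mem_filter hmem
          rw [h] at this
          simp [hc] at this
        have hfind : pvFirst (q :: L) lab = pvFirst L lab := by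
          have hpred : ¬ ((fun r : String × String => r.1 == lab) q = true) := by
            simp only [beq_iff_eq]
            exact fun h => hne h.symm
          simp only [pvFirst]
          rw [List.find?_cons_of_neg (p := fun r : String × String => r.1 == lab) (a := q) (l := L) hpred]
        rw [hfind]
      · have hstep : pvStepA d q = d.insert q.1 q.2 := by simp [pvStepA, hb, hc]
        have hcf : d.contains q.1 = false := by simpa using hc
        rw [hstep, ih (d.insert q.1 q.2) (PySem.Dict.nodup_keys_insert d q.1 q.2 hd),
          PySem.Dict.items_insert_of_not_contains _ _ hcf]
        have hfq : pvFirst (q :: L) q.1 = q.2 := by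
          simp only [pvFirst]
          rw [List.find?_cons_of_pos (p := fun r : String × String => r.1 == q.1) (a := q) (l := L) (by simp)]
          rfl
        rw [List.filter_cons, if_pos (by simp [hcf]), List.map_cons, hfq,
          List.append_assoc, List.singleton_append]
        congr 2
        have hins : ((PySem.Set.ofList ((L.map Prod.fst).filter (fun lab => lab != ""))).filter
              (fun lab => !((d.insert q.1 q.2).contains lab)))
            = ((PySem.Set.ofList ((L.map Prod.fst).filter (fun lab => lab != ""))).discard q.1).filter
              (fun lab => !(d.contains lab)) := by
          rw [PySem.Set.discard, List.filter_filter]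
          apply List.filter_congr
          intro lab _
          rw [PySem.Dict.contains_insert]
          by_cases hql : lab = q.1
          · subst hql; simp
          · simp [beq_eq_false_iff_ne.mpr hql]
        rw [hins]
        apply List.map_congr_left
        intro lab hmem
        have hne : lab ≠ q.1 :=
          ((PySem.Set.mem_discard _ _ _).mp (List.mem_filter.mp hmem).1).2
        have hfind : pvFirst (q :: L) lab = pvFirst L lab := by
          have hpred : ¬ ((fun r : String × String => r.1 == lab) q = true) := by
            simp only [beq_iff_eq]
            exact fun h => hne h.symm
          simp only [pvFirst]
          rw [List.find?_cons_of_neg (p := fun r : String × String => r.1 == lab) (a := q) (l := L) hpred]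
        rw [hfind]

-- ===== VERDICT (by name: the statement is the Claim_ definition above) =====
theorem build_prefix_by_label_spec : Claim_equal_build_prefix_by_label := by
  intro ps _
  show build_prefix_by_label ps = build_prefix_by_label_alt ps
  unfold build_prefix_by_label build_prefix_by_label_alt
  rw [pvStep_eq, ← List.foldl_map, pvMain _ PySem.Dict.empty (by simp [PySem.Dict.keys, PySem.Dict.empty])]
  dsimp only
  have hded : ∀ xs : List String, PySem.List.dedup xs = PySem.Set.ofList xs := fun _ => rfl
  rw [hded]
  set L := List.map (fun pr => (pvAltLabel pr.2, PySem.Str.strip pr.1)) ps with hL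
  set FV := List.foldl (fun d q => if (q.1 != "") = true then d.insert q.1 q.2 else d) PySem.Dict.empty L.reverse with hFV
  set O := PySem.Set.ofList (List.filter (fun lab => lab != "") (List.map Prod.fst L)) with hO
  rw [PySem.Dict.items_foldl_insert_fresh O (fun a => a) (fun lab => FV.getD lab "") PySem.Dict.empty
      (fun a _ => PySem.Dict.contains_empty a)
      (by rw [List.map_id_fun']; exact hO ▸ PySem.Set.nodup_ofList (List.filter (fun lab => lab != "") (List.map Prod.fst L)))]
  have hfilt : List.filter (fun lab => !(PySem.Dict.empty.contains (κ := String) (ν := String) lab)) O = O := by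
    simp [PySem.Dict.contains_empty]
  rw [hfilt]
  congr 1
  apply List.map_congr_left
  intro lab hmem
  have hlab : lab ≠ "" := by
    have := List.of_mem_filter ((PySem.Set.mem_ofList _ _).mp (hO ▸ hmem))
    simpa using this
  have hget := pvFirstVal_get? L lab hlab
  rw [← hFV] at hget
  show (lab, pvFirst L lab) = (lab, FV.getD lab "")
  simp only [pvFirst, PySem.Dict.getD, hget]
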